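-- pv_equiv track=rewrite | github.com/Lysagxra/BunkrDownloader | helpers/download_utils.py | get_chunk_size
-- ===== SOURCE A (Python) =====
-- KB = 1024
--
-- MB = 1024 * KB
--
-- def get_chunk_size(file_size):
--     """
--     Determines the optimal chunk size based on the file size.
--
--     Args:
--         file_size (int): The size of the file in bytes.
--
--     Returns:
--         int: The optimal chunk size in bytes.
--     """
--     thresholds = [
--         (1 * MB, 16 * KB),     # Less than 1 MB
--         (10 * MB, 64 * KB),    # 1 MB to 10 MB
--         (50 * MB, 128 * KB),   # 10 MB to 50 MB
--         (100 * MB, 256 * KB),  # 50 MB to 100 MB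
--         (250 * MB, 512 * KB),  # 100 MB to 250 MB
--     ]
--
--     for threshold, chunk_size in thresholds:
--         if file_size < threshold:
--             return chunk_size
--
--     return 2 * MB
-- ===== SOURCE B (Python) =====
-- import bisect
--
-- KB = 1024
-- MB = 1024 * KB
--
-- _THRESHOLDS = [1 * MB, 10 * MB, 50 * MB, 100 * MB, 250 * MB]
-- _CHUNK_SIZES = [16 * KB, 64 * KB, 128 * KB, 256 * KB, 512 * KB, 2 * MB]
--
-- def get_chunk_size(file_size):
--     return _CHUNK_SIZES[bisect.bisect_right(_THRESHOLDS, file_size)]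
-- ===== Notes on version B (the rewrite author's own statement) =====
-- stated objective: idiomatic
-- what changed: Replaces the linear scan over (threshold, chunk) pairs with a table lookup: bisect_right on a sorted threshold list indexes into a parallel chunk-size list whose last slot is the default.
import Mathlib
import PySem

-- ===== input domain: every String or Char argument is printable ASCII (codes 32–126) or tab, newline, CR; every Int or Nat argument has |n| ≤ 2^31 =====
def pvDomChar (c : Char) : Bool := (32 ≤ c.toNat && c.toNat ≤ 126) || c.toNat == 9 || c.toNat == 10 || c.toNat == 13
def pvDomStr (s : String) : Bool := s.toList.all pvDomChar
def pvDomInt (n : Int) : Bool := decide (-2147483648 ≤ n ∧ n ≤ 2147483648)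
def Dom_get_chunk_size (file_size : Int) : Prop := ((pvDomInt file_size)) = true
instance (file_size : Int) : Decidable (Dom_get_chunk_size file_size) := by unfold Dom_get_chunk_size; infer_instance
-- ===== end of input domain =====

-- B replaces A's linear scan over (threshold, chunk) pairs by a bisect_right index into
-- parallel constant tables (idiomatic table lookup); return values proved identical.

-- ===== PORT A =====
def pvKB : Int := 1024
def pvMB : Int := 1024 * pvKB

-- the loop 'for threshold, chunk_size in thresholds: if file_size < threshold: return chunk_size'
def pvScanA (file_size : Int) : List (Int × Int) → Option Int
  | [] => none
  | (threshold, chunk_size) :: rest =>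
      if file_size < threshold then some chunk_size else pvScanA file_size rest

def get_chunk_size (file_size : Int) : Int :=
  let thresholds : List (Int × Int) :=
    [(1 * pvMB, 16 * pvKB), (10 * pvMB, 64 * pvKB), (50 * pvMB, 128 * pvKB),
     (100 * pvMB, 256 * pvKB), (250 * pvMB, 512 * pvKB)]
  (pvScanA file_size thresholds).getD (2 * pvMB)

-- ===== PORT B =====
def pvThresholds : List Int := [1 * pvMB, 10 * pvMB, 50 * pvMB, 100 * pvMB, 250 * pvMB]
def pvChunkSizes : List Int := [16 * pvKB, 64 * pvKB, 128 * pvKB, 256 * pvKB, 512 * pvKB, 2 * pvMB]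

-- bisect.bisect_right on a sorted list = number of elements ≤ x (the library call, ported by its contract)
def pvBisectRight (xs : List Int) (x : Int) : Nat := xs.countP (fun t => t ≤ x)

def get_chunk_size_alt (file_size : Int) : Int :=
  pvChunkSizes.getD (pvBisectRight pvThresholds file_size) 0

-- ===== PRECONDITION & SPEC =====
def Spec_get_chunk_size (file_size : Int) (out : Int) : Prop := out = get_chunk_size_alt file_size
instance (file_size : Int) (out : Int) : Decidable (Spec_get_chunk_size file_size out) := by unfold Spec_get_chunk_size; infer_instance

-- ===== CLAIM (what is proved, stated in full; the proofs are below) =====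
def Claim_equal_get_chunk_size : Prop := ∀ (file_size : Int), Dom_get_chunk_size file_size → Spec_get_chunk_size file_size (get_chunk_size file_size)

-- ===== LEMMAS AND PROOFS =====

-- ===== VERDICT (by name: the statement is the Claim_ definition above) =====
theorem get_chunk_size_spec : Claim_equal_get_chunk_size := by
  intro fs _
  unfold Spec_get_chunk_size get_chunk_size get_chunk_size_alt pvBisectRight
  simp only [pvScanA, pvThresholds, pvChunkSizes, pvMB, pvKB, List.countP_cons, List.countP_nil]
  norm_num
  split_ifs <;> simp_all <;> omega
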